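-- pv_equiv track=rewrite | github.com/jppn123/coisas | automações/paresImpares.py | organizar_pares_impares
-- ===== SOURCE A (Python) =====
-- def organizar_pares_impares(arr):
--     if not arr:
--         return []
--
--     primeiro = arr[0]
--     resto = arr[1:]
--
--     pares = [x for x in resto if x % 2 == 0]
--     impares = [x for x in resto if x % 2 != 0]
--     if primeiro %2 == 0:
--         return [primeiro] + organizar_pares_impares(pares) + organizar_pares_impares(impares)
--     return organizar_pares_impares(pares) + organizar_pares_impares(impares) + [primeiro]
-- ===== SOURCE B (Python) =====
-- def organizar_pares_impares(arr):
--     evens = []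
--     odds = []
--     for x in arr:
--         if x % 2 == 0:
--             evens.append(x)
--         else:
--             odds.append(x)
--     return evens + odds[::-1]
-- ===== Notes on version B (the rewrite author's own statement) =====
-- stated objective: faster
-- what changed: Replaced the O(n^2) recursive partition-and-recurse (which effectively yields evens in order followed by odds reversed) with a single pass splitting into two lists and reversing the odds once.
import Mathlib
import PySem

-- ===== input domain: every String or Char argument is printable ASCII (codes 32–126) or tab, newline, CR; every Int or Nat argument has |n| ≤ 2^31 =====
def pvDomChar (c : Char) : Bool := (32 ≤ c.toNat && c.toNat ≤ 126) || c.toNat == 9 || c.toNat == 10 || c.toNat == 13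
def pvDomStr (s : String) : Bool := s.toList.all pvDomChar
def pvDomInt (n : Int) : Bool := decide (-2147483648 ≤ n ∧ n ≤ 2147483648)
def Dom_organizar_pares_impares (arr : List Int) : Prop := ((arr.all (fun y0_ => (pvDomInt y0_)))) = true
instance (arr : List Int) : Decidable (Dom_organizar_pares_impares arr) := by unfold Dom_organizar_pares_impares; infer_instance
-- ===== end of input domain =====

-- B replaces A's O(n^2) recursive partition-and-recurse with a single O(n) pass:
-- split into evens/odds once, return evens ++ reverse odds (same value, asymptotically faster).


-- ===== PORT A =====
-- 'x % 2 == 0' of the Python, shared verbatim by both ports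
def pvIsPar (x : Int) : Bool := PySem.Int.mod x 2 == 0

def organizar_pares_impares : List Int → List Int
  | [] => []
  | primeiro :: resto =>
    let pares := resto.filter (fun x => pvIsPar x)
    let impares := resto.filter (fun x => !(pvIsPar x))
    if pvIsPar primeiro then
      [primeiro] ++ organizar_pares_impares pares ++ organizar_pares_impares impares
    else
      organizar_pares_impares pares ++ organizar_pares_impares impares ++ [primeiro]
termination_by arr => arr.length
decreasing_by
  all_goals
    simp only [List.length_cons, List.length_unattach]
    exact Nat.lt_succ_of_le (le_trans (List.length_filter_le _ _) (by simp))

-- ===== PORT B =====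
def organizar_pares_impares_alt (arr : List Int) : List Int :=
  let p := arr.foldl
    (fun (acc : List Int × List Int) x =>
      if pvIsPar x then (acc.1 ++ [x], acc.2) else (acc.1, acc.2 ++ [x]))
    ([], [])
  p.1 ++ p.2.reverse

-- ===== PRECONDITION & SPEC =====
def Spec_organizar_pares_impares (arr : List Int) (out : List Int) : Prop := out = organizar_pares_impares_alt arr
instance (arr : List Int) (out : List Int) : Decidable (Spec_organizar_pares_impares arr out) := by unfold Spec_organizar_pares_impares; infer_instance

-- ===== CLAIM (what is proved, stated in full; the proofs are below) =====
def Claim_equal_organizar_pares_impares : Prop := ∀ (arr : List Int), Dom_organizar_pares_impares arr → Spec_organizar_pares_impares arr (organizar_pares_impares arr)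

-- ===== LEMMAS AND PROOFS =====

theorem pv_foldl_split (l : List Int) (e o : List Int) :
    l.foldl (fun (acc : List Int × List Int) x =>
      if pvIsPar x then (acc.1 ++ [x], acc.2) else (acc.1, acc.2 ++ [x])) (e, o)
    = (e ++ l.filter (fun x => pvIsPar x), o ++ l.filter (fun x => !(pvIsPar x))) := by
  induction l generalizing e o with
  | nil => simp
  | cons a t ih =>
    by_cases h : pvIsPar a = true <;>
      simp only [List.foldl_cons, List.filter_cons, h, if_pos, if_neg, Bool.not_true,
        Bool.not_false, Bool.false_eq_true, not_false_iff, ih] <;>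
      simp

theorem pv_org_closed (n : Nat) (l : List Int) (hl : l.length ≤ n) :
    organizar_pares_impares l
    = l.filter (fun x => pvIsPar x) ++ (l.filter (fun x => !(pvIsPar x))).reverse := by
  induction n generalizing l with
  | zero =>
    have : l = [] := List.eq_nil_of_length_eq_zero (Nat.le_zero.mp hl)
    subst this; simp [organizar_pares_impares]
  | succ n ih =>
    match l with
    | [] => simp [organizar_pares_impares]
    | a :: t =>
      have ht : t.length ≤ n := Nat.lt_succ_iff.mp hl
      have e1 := ih (t.filter (fun x => pvIsPar x)) (le_trans (List.length_filter_le _ _) ht)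
      have e2 := ih (t.filter (fun x => !(pvIsPar x))) (le_trans (List.length_filter_le _ _) ht)
      rw [organizar_pares_impares]
      by_cases h : pvIsPar a = true <;>
        simp [h, e1, e2, List.filter_filter]

-- ===== VERDICT (by name: the statement is the Claim_ definition above) =====
theorem organizar_pares_impares_spec : Claim_equal_organizar_pares_impares := by
  intro arr _
  unfold Spec_organizar_pares_impares organizar_pares_impares_alt
  rw [pv_foldl_split]
  simpa using pv_org_closed arr.length arr le_rfl
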